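-- pv_equiv track=rewrite | github.com/chuckie-xch/py-quickstart | leetcode/daily/year25/m04/day09.py | minOperations2
-- ===== SOURCE A (Python) =====
-- from typing import List
--
-- def minOperations2(nums: List[int], k: int) -> int:
--     st = set()
--     for x in nums:
--         if x < k:
--             return -1
--         if x > k:
--             st.add(x)
--     return len(st)
-- ===== SOURCE B (Python) =====
-- from typing import List
--
-- def minOperations2(nums: List[int], k: int) -> int:
--     s = sorted(nums)
--     if s and s[0] < k:
--         return -1
--     count = 0
--     prev = None
--     for x in s:
--         if x > k and x != prev:
--             count += 1
--         prev = x
--     return count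
-- ===== Notes on version B (the rewrite author's own statement) =====
-- stated objective: alternative
-- what changed: Replaces A's hash-set single pass (early-return loop accumulating a set) by sort-then-scan: sort the list, read the failure condition off the minimum (sorted head), and count distinct values above k by comparing each element with its predecessor in the sorted order, with no set at all.
import Mathlib
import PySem

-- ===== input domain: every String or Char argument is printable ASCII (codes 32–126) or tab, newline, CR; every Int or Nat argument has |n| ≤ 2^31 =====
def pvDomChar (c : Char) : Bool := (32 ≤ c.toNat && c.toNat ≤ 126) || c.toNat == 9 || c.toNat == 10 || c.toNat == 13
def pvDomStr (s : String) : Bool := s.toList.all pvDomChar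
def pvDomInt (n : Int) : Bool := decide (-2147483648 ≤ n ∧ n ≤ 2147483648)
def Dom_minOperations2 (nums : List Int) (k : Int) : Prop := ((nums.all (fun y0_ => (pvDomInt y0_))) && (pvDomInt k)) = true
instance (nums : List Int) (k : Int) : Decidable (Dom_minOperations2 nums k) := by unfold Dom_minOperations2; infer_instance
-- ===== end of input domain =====

-- B replaces A's hash-set single pass by sort-then-scan: read the failure condition off the sorted head and count distinct values above k by comparing adjacent sorted elements; same values everywhere.

-- ===== PORT A =====
-- the for-loop with its early 'return -1', carrying the growing set st
def minOperations2_loop (k : Int) : List Int → PySem.Set Int → Int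
  | [], st => PySem.Set.len st
  | x :: xs, st =>
      if x < k then -1
      else minOperations2_loop k xs (if x > k then PySem.Set.add st x else st)

def minOperations2 (nums : List Int) (k : Int) : Int :=
  minOperations2_loop k nums PySem.Set.empty

-- ===== PORT B =====
-- the for-loop over the sorted list, carrying (count, prev); prev = None ↦ none
def minOperations2_alt_loop (k : Int) : List Int → Option Int → Int → Int
  | [], _, c => c
  | x :: xs, prev, c =>
      minOperations2_alt_loop k xs (some x) (if x > k ∧ prev ≠ some x then c + 1 else c)

def minOperations2_alt (nums : List Int) (k : Int) : Int :=
  let s := PySem.List.sorted nums (fun x => x) false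
  -- 'if s and s[0] < k: return -1'
  if s.head?.elim false (fun x => decide (x < k)) then -1
  else minOperations2_alt_loop k s none 0

-- ===== PRECONDITION & SPEC =====
def Spec_minOperations2 (nums : List Int) (k : Int) (out : Int) : Prop := out = minOperations2_alt nums k
instance (nums : List Int) (k : Int) (out : Int) : Decidable (Spec_minOperations2 nums k out) := by unfold Spec_minOperations2; infer_instance

-- ===== CLAIM (what is proved, stated in full; the proofs are below) =====
def Claim_equal_minOperations2 : Prop := ∀ (nums : List Int) (k : Int), Dom_minOperations2 nums k → Spec_minOperations2 nums k (minOperations2 nums k)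

-- ===== LEMMAS AND PROOFS =====

def prevSet : Option Int → Finset Int
  | none => ∅
  | some p => {p}

theorem prevSet_some (p : Int) : prevSet (some p) = {p} := rfl

theorem prevSet_none : prevSet none = (∅ : Finset Int) := rfl

-- A's loop, characterised: -1 on any element below k, else the set of kept elements
theorem minOperations2_loop_eq (k : Int) (l : List Int) (st : PySem.Set Int) :
    minOperations2_loop k l st =
      if l.any (fun x => decide (x < k)) then -1
      else PySem.Set.len ((l.filter (fun x => decide (x > k))).foldl PySem.Set.add st) := by
  induction l generalizing st with
  | nil => simp [minOperations2_loop]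
  | cons x xs ih =>
      by_cases hx : x < k
      · simp [minOperations2_loop, hx]
      · by_cases hg : x > k <;>
          simp [minOperations2_loop, hx, hg, ih, List.any_cons]

-- the size of set(l) is the number of distinct elements of l
theorem set_len_ofList_eq_card (l : List Int) :
    PySem.Set.len (PySem.Set.ofList l) = (l.toFinset.card : Int) := by
  have hto : (PySem.Set.ofList l).toFinset = l.toFinset := by
    ext y; simp [List.mem_toFinset, PySem.Set.mem_ofList]
  have hlen := List.toFinset_card_of_nodup (PySem.Set.nodup_ofList (xs := l))
  rw [hto] at hlen
  simp [PySem.Set.len, ← hlen]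

-- A, characterised on the whole input
theorem a_char (nums : List Int) (k : Int) :
    minOperations2 nums k =
      if nums.any (fun x => decide (x < k)) then -1
      else ((nums.filter (fun x => decide (x > k))).toFinset.card : Int) := by
  unfold minOperations2
  rw [minOperations2_loop_eq]
  by_cases hany : nums.any (fun x => decide (x < k)) = true
  · simp [hany]
  · simp only [hany, Bool.false_eq_true, if_false]
    rw [show (PySem.Set.empty : PySem.Set Int) = [] from rfl, ← PySem.Set.ofList_eq_foldl]
    exact set_len_ofList_eq_card _

-- B's scan over a sorted list counts the distinct values above k not yet seen (prev)
theorem alt_loop_eq (k : Int) (s : List Int) (hs : s.Pairwise (· ≤ ·)) (prev : Option Int)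
    (hp : ∀ p, prev = some p → ∀ y ∈ s, p ≤ y) (c : Int) :
    minOperations2_alt_loop k s prev c =
      c + (((s.filter (fun x => decide (x > k))).toFinset \ prevSet prev).card : Int) := by
  induction s generalizing prev c with
  | nil => simp [minOperations2_alt_loop]
  | cons x xs ih =>
      have hx_le : ∀ y ∈ xs, x ≤ y := fun y hy => (List.pairwise_cons.mp hs).1 y hy
      have hxs : xs.Pairwise (· ≤ ·) := (List.pairwise_cons.mp hs).2
      rw [minOperations2_alt_loop, ih hxs (some x) (by intro p hp'; cases hp'; exact hx_le)]
      set F := (xs.filter (fun x => decide (x > k))).toFinset with hF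
      by_cases hk : x > k
      · have hfilter : ((x :: xs).filter (fun x => decide (x > k))).toFinset = insert x F := by
          simp [hk, hF]
        by_cases hprev : prev = some x
        · subst hprev
          have hins : insert x F \ prevSet (some x) = F \ prevSet (some x) := by
            ext y; by_cases hy : y = x <;> simp [prevSet_some, hy]
          simp [hfilter, hins]
        · have hPdisj : ∀ y ∈ insert x F, y ∉ prevSet prev := by
            intro y hy
            cases prev with
            | none => simp [prevSet_none]
            | some p =>
                have hpx : p ≤ x := hp p rfl x (by simp)
                have hne : p ≠ x := fun h => hprev (by rw [h])
                have hlt : p < x := lt_of_le_of_ne hpx hne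
                have hpy : p < y := by
                  rcases Finset.mem_insert.mp hy with h | h
                  · exact h ▸ hlt
                  · have hyxs : y ∈ xs := by
                      have := List.mem_toFinset.mp (hF ▸ h)
                      exact (List.mem_filter.mp this).1
                    exact lt_of_lt_of_le hlt (hx_le y hyxs)
                simp [prevSet_some]
                omega
          have hsd : insert x F \ prevSet prev = insert x F := by
            apply Finset.sdiff_eq_self_of_disjoint
            exact Finset.disjoint_left.mpr hPdisj
          have hcard : (insert x F).card = (F \ {x}).card + 1 := by
            have h1 : insert x F = insert x (F \ {x}) := by
              ext y; by_cases hy : y = x <;> simp [hy]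
            rw [h1, Finset.card_insert_of_notMem (by simp)]
          rw [hfilter, hsd, if_pos ⟨hk, hprev⟩, prevSet_some, hcard]
          push_cast
          ring
      · have hfilter : ((x :: xs).filter (fun x => decide (x > k))).toFinset = F := by
          simp [hk, hF]
        have hFgt : ∀ y ∈ F, k < y := by
          intro y hy
          have hmem := List.mem_toFinset.mp (hF ▸ hy)
          have := (List.mem_filter.mp hmem).2
          simpa using this
        have h1 : F \ {x} = F := by
          apply Finset.sdiff_eq_self_of_disjoint
          refine Finset.disjoint_left.mpr ?_
          intro y hy
          have := hFgt y hy
          simp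
          omega
        have h2 : F \ prevSet prev = F := by
          apply Finset.sdiff_eq_self_of_disjoint
          refine Finset.disjoint_left.mpr ?_
          intro y hy
          cases prev with
          | none => simp [prevSet_none]
          | some p =>
              have hpx : p ≤ x := hp p rfl x (by simp)
              have := hFgt y hy
              simp [prevSet_some]
              omega
        rw [if_neg (by simp [hk]), hfilter, h2, prevSet_some, h1]

-- the head of sorted(nums) is below k iff some element of nums is
theorem head_lt_iff_any (nums : List Int) (k : Int) :
    ((PySem.List.sorted nums (fun x => x) false).head?.elim false (fun x => decide (x < k))) =
      nums.any (fun x => decide (x < k)) := by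
  rw [Bool.eq_iff_iff]
  constructor
  · intro h
    cases hs : (PySem.List.sorted nums (fun x => x) false).head? with
    | none => rw [hs] at h; simp at h
    | some m =>
        rw [hs] at h
        simp at h
        have hm : m ∈ nums := by
          have hmem : m ∈ PySem.List.sorted nums (fun x => x) false := List.mem_of_mem_head? hs
          exact (PySem.List.mem_sorted _ _ _ _).mp hmem
        simp [List.any_eq_true]
        exact ⟨m, hm, h⟩
  · intro h
    simp [List.any_eq_true] at h
    obtain ⟨y, hy, hyk⟩ := h
    cases hs : PySem.List.sorted nums (fun x => x) false with
    | nil =>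
        have hys : y ∈ PySem.List.sorted nums (fun x => x) false := (PySem.List.mem_sorted _ _ _ _).mpr hy
        rw [hs] at hys; simp at hys
    | cons m t =>
        have hle : m ≤ y := PySem.List.key_head_sorted_le nums (fun x => x) hs y hy
        simp
        omega

-- B, characterised on the whole input
theorem b_char (nums : List Int) (k : Int) :
    minOperations2_alt nums k =
      if nums.any (fun x => decide (x < k)) then -1
      else ((nums.filter (fun x => decide (x > k))).toFinset.card : Int) := by
  unfold minOperations2_alt
  show (if ((PySem.List.sorted nums (fun x => x) false).head?.elim false fun x => decide (x < k)) = true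
        then -1 else minOperations2_alt_loop k (PySem.List.sorted nums (fun x => x) false) none 0) = _
  rw [head_lt_iff_any]
  by_cases hany : nums.any (fun x => decide (x < k)) = true
  · simp [hany]
  · simp only [hany, Bool.false_eq_true, if_false]
    have hsorted : (PySem.List.sorted nums (fun x => x) false).Pairwise (· ≤ ·) := by
      simpa using PySem.List.sorted_pairwise (xs := nums) (key := fun x => x)
    rw [alt_loop_eq k _ hsorted none (by intro p h; cases h) 0, prevSet_none]
    have hpf : ((PySem.List.sorted nums (fun x => x) false).filter (fun x => decide (x > k))).Perm
        (nums.filter (fun x => decide (x > k))) :=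
      (PySem.List.sorted_perm nums (fun x => x) false).filter _
    rw [List.toFinset_eq_of_perm _ _ hpf]
    simp

-- ===== VERDICT (by name: the statement is the Claim_ definition above) =====
theorem minOperations2_spec : Claim_equal_minOperations2 := by
  intro nums k _
  unfold Spec_minOperations2
  rw [a_char, b_char]
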